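-- pv_equiv track=rewrite | github.com/SungChanl/Base-Training | python/daily_Quiz/Day5_Quiz.py | solution
-- ===== SOURCE A (Python) =====
-- def solution(num_list):
--     answer = 0
--     even = ""
--     odd = ""
--     for i in range(len(num_list)):
--         if num_list[i] % 2 == 0:
--             even += str(num_list[i])
--         else:
--             odd += str(num_list[i])
--     answer = int(even+odd)
--     return answer
-- ===== SOURCE B (Python) =====
-- def solution(num_list):
--     ordered = sorted(num_list, key=lambda x: x % 2)
--     return int(''.join(str(x) for x in ordered))
-- ===== Notes on version B (the rewrite author's own statement) =====
-- stated objective: alternative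
-- what changed: Replaces the explicit even/odd bucket loop over indices with a single stable sort keyed on x % 2 (evens before odds, original order kept within each group) followed by one join.
import Mathlib
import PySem

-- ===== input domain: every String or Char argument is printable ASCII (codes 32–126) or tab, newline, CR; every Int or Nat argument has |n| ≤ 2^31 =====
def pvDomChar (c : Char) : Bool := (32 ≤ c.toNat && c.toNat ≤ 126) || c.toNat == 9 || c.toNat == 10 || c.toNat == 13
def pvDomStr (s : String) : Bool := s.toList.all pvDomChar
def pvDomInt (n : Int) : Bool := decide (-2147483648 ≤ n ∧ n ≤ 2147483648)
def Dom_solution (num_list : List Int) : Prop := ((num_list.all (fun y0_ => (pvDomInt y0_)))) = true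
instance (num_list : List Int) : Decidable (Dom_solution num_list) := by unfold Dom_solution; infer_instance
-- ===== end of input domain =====

-- B replaces A's even/odd bucket loop by one stable sort on parity; same value wherever A returns (alternative decomposition, not claimed faster).
-- Strings are carried as List Char via PySem.Int.toChars/ofChars? (exact; PySem's string semantics are defined on List Char).

-- ===== PORT A =====
def solution (num_list : List Int) : Int :=
  -- answer = 0 is dead (overwritten); even/odd are the two string accumulators
  let p := (PySem.List.pyRange 0 (PySem.List.len num_list) 1).foldl
    (fun (st : List Char × List Char) i =>
      let x := PySem.List.pyGetD num_list i 0   -- index always in range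
      if PySem.Int.mod x 2 = 0 then (st.1 ++ PySem.Int.toChars x, st.2)
      else (st.1, st.2 ++ PySem.Int.toChars x)) ([], [])
  (PySem.Int.ofChars? (p.1 ++ p.2)).getD 0      -- int(even+odd); none excluded by Pre_

-- ===== PORT B =====
def solution_alt (num_list : List Int) : Int :=
  let ordered := PySem.List.sorted num_list (fun x => PySem.Int.mod x 2) false
  -- ''.join(str(x) for x in ordered): join with empty separator = flatten of the pieces (exact)
  (PySem.Int.ofChars? ((ordered.map PySem.Int.toChars).flatten)).getD 0

-- ===== PRECONDITION & SPEC =====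
-- A raises ValueError exactly when the concatenated string is not an int literal: the list is
-- empty, or some element other than the first one in even-then-odd order is negative (its '-'
-- lands mid-string). B raises there too; Pre_ excludes exactly those inputs.
def Pre_solution (num_list : List Int) : Prop :=
  num_list ≠ [] ∧
  (((num_list.filter (fun x => decide (PySem.Int.mod x 2 = 0)) ++
     num_list.filter (fun x => !decide (PySem.Int.mod x 2 = 0))).tail).all
      (fun y => decide (0 ≤ y))) = true
instance (num_list : List Int) : Decidable (Pre_solution num_list) := by
  unfold Pre_solution; infer_instance
def pvWitness_solution : List Int := [2, 3, 5, 4]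

def Spec_solution (num_list : List Int) (out : Int) : Prop := out = solution_alt num_list
instance (num_list : List Int) (out : Int) : Decidable (Spec_solution num_list out) := by unfold Spec_solution; infer_instance

-- ===== CLAIM (what is proved, stated in full; the proofs are below) =====
def Claim_equal_solution : Prop := ∀ (num_list : List Int), Dom_solution num_list → Pre_solution num_list → Spec_solution num_list (solution num_list)

-- ===== LEMMAS AND PROOFS =====

-- inserting x before every element of O and after every element of E lands it exactly between them
theorem insertBy_between (bef : Int → Int → Bool) (x : Int) (E O : List Int)
    (hE : ∀ y ∈ E, bef x y = false) (hO : ∀ o ∈ O, bef x o = true) :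
    PySem.List.insertBy bef x (E ++ O) = E ++ x :: O := by
  induction E with
  | nil =>
    cases O with
    | nil => rfl
    | cons o O' => simp [PySem.List.insertBy, hO o (by simp)]
  | cons e E' ih =>
    simp only [List.cons_append, PySem.List.insertBy, hE e (by simp)]
    simp only [Bool.false_eq_true, if_false, List.cons.injEq, true_and]
    exact ih (fun y hy => hE y (by simp [hy])) 

-- the insertion-sort fold with a {0,1}-valued key stacks key-0 elements after E and key-1 after O
theorem foldl_insertBy_two_valued (key : Int → Int) (xs : List Int) :
    ∀ (E O : List Int),
    (∀ x ∈ xs, key x = 0 ∨ key x = 1) →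
    (∀ y ∈ E, key y = 0) → (∀ y ∈ O, key y = 1) →
    xs.foldl (fun acc x => PySem.List.insertBy (fun a b => decide (key a < key b)) x acc) (E ++ O)
      = E ++ xs.filter (fun x => decide (key x = 0)) ++
        (O ++ xs.filter (fun x => !decide (key x = 0))) := by
  induction xs with
  | nil => intro E O _ _ _; simp
  | cons x xs ih =>
    intro E O hk hE hO
    rcases hk x (by simp) with h0 | h1
    · have hstep : PySem.List.insertBy (fun a b => decide (key a < key b)) x (E ++ O)
          = (E ++ [x]) ++ O := by
        rw [insertBy_between _ x E O
          (fun y hy => by simp [h0, hE y hy])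
          (fun o ho => by simp [h0, hO o ho])]
        simp
      simp only [List.foldl_cons, hstep]
      rw [ih (E ++ [x]) O (fun y hy => hk y (by simp [hy]))
        (by intro y hy; rcases List.mem_append.mp hy with h | h
            · exact hE y h
            · simpa using (List.mem_singleton.mp h ▸ h0)) hO]
      simp [h0, List.append_assoc]
    · have hstep : PySem.List.insertBy (fun a b => decide (key a < key b)) x (E ++ O)
          = E ++ (O ++ [x]) := by
        have := insertBy_between (fun a b => decide (key a < key b)) x (E ++ O) []
          (by intro y hy
              rcases List.mem_append.mp hy with h | h
              · simp [h1, hE y h]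
              · simp [h1, hO y h])
          (by intro o ho; simp at ho)
        simpa [List.append_assoc] using this
      simp only [List.foldl_cons, hstep, ← List.append_assoc]
      rw [List.append_assoc E O [x],
          ih E (O ++ [x]) (fun y hy => hk y (by simp [hy])) hE
        (by intro y hy; rcases List.mem_append.mp hy with h | h
            · exact hO y h
            · simpa using (List.mem_singleton.mp h ▸ h1))]
      simp [h1, List.append_assoc]

-- B's sort groups evens (key 0) before odds (key 1), each in original order
theorem sorted_parity (xs : List Int) :
    PySem.List.sorted xs (fun x => PySem.Int.mod x 2) false
      = xs.filter (fun x => decide (PySem.Int.mod x 2 = 0)) ++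
        xs.filter (fun x => !decide (PySem.Int.mod x 2 = 0)) := by
  have hk : ∀ x ∈ xs, PySem.Int.mod x 2 = 0 ∨ PySem.Int.mod x 2 = 1 := by
    intro x _
    have h1 := PySem.Int.mod_nonneg x (b := 2) (by norm_num)
    have h2 := PySem.Int.mod_lt x (b := 2) (by norm_num)
    omega
  have := foldl_insertBy_two_valued (fun x => PySem.Int.mod x 2) xs [] [] hk
    (by simp) (by simp)
  rw [PySem.List.sorted_eq_foldl_insertBy]
  simpa using this

-- A's accumulator loop builds the two filtered concatenations
theorem foldA (xs : List Int) : ∀ (e o : List Char),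
    xs.foldl (fun (st : List Char × List Char) x =>
        if PySem.Int.mod x 2 = 0 then (st.1 ++ PySem.Int.toChars x, st.2)
        else (st.1, st.2 ++ PySem.Int.toChars x)) (e, o)
      = (e ++ (xs.filter (fun x => decide (PySem.Int.mod x 2 = 0))).flatMap PySem.Int.toChars,
         o ++ (xs.filter (fun x => !decide (PySem.Int.mod x 2 = 0))).flatMap PySem.Int.toChars) := by
  induction xs with
  | nil => intro e o; simp
  | cons x xs ih =>
    intro e o
    by_cases h : PySem.Int.mod x 2 = 0
    · rw [List.foldl_cons, if_pos h, ih,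
        List.filter_cons_of_pos (by simpa using h),
        List.filter_cons_of_neg (by simpa using h)]
      simp [List.append_assoc]
    · rw [List.foldl_cons, if_neg h, ih,
        List.filter_cons_of_neg (by simpa using h),
        List.filter_cons_of_pos (by simpa using h)]
      simp [List.append_assoc]

-- ===== VERDICT (by name: the statement is the Claim_ definition above) =====
theorem solution_spec : Claim_equal_solution := by
  intro num_list _ _
  unfold Spec_solution solution solution_alt
  rw [PySem.List.foldl_pyRange_zero_pyGetD num_list 0
    (fun (st : List Char × List Char) x =>
        if PySem.Int.mod x 2 = 0 then (st.1 ++ PySem.Int.toChars x, st.2)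
        else (st.1, st.2 ++ PySem.Int.toChars x)) ([], [])]
  rw [foldA num_list [] [], sorted_parity num_list]
  simp [List.flatMap_def, List.map_append, List.flatten_append]
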